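-- pv_equiv track=rewrite | github.com/dosdos/Google-CodeJam | 2013/round_1C/A_consonants/consonant.py | has_at_least_n_consecutive_consonants
-- ===== SOURCE A (Python) =====
-- vowels = "aeiou"
--
-- def has_at_least_n_consecutive_consonants(s, n):
--     if len(s) < n:
--         return False
--     else:
--         max = 0
--         i = 0
--         for c in s:
--             if c in vowels:
--                 i = 0
--             else:
--                 i += 1
--                 if i > max:
--                     max = i
--             if max >= n:
--                 return True
--
--     return False
-- ===== SOURCE B (Python) =====
-- vowels = "aeiou"
--
--
-- def has_at_least_n_consecutive_consonants(s, n):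
--     # Peel off maximal consonant blocks one at a time, keep the longest,
--     # then compare once at the end (empty string is always False).
--     if not s:
--         return False
--     longest = 0
--     rest = s
--     while rest:
--         k = 0
--         while k < len(rest) and rest[k] not in vowels:
--             k += 1
--         if k > longest:
--             longest = k
--         rest = rest[k + 1:]
--     return longest >= n
-- ===== Notes on version B (the rewrite author's own statement) =====
-- stated objective: alternative
-- what changed: Replaces A's per-character counter with interleaved early return by a run-peeling loop: repeatedly strip the maximal leading consonant block and the vowel after it, keep the longest block, and compare against n once at the end.
import Mathlib
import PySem

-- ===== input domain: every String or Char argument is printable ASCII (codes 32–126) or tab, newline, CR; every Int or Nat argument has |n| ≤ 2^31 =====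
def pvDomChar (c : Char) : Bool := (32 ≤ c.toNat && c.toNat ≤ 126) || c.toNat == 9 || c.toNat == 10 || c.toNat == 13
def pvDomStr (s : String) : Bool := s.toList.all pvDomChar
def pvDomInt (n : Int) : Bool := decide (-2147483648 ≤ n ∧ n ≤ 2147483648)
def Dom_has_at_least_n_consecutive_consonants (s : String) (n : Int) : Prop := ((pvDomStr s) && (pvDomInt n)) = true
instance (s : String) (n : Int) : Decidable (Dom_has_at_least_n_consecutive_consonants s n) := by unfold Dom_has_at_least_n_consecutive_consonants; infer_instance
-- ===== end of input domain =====

-- B rewrites A's interleaved early-return counter as: peel maximal consonant blocks,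
-- keep the longest, compare once at the end (objective: alternative decomposition).

-- module-level constant `vowels = "aeiou"` (shared by both Python versions)
def pvVowels : List Char := "aeiou".toList

-- ===== PORT A =====
-- the `for c in s` loop of A, with its early `return True`
def pvLoopA (n : Int) : List Char → Int → Int → Bool
  | [], _, _ => false
  | c :: cs, i, mx =>
    -- `if c in vowels: i = 0  else: i += 1; if i > max: max = i`
    let i' := if pvVowels.contains c then 0 else i + 1
    let mx' := if pvVowels.contains c then mx else (if i' > mx then i' else mx)
    if mx' ≥ n then true else pvLoopA n cs i' mx'

def has_at_least_n_consecutive_consonants (s : String) (n : Int) : Bool :=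
  if (s.length : Int) < n then false
  else pvLoopA n s.toList 0 0

-- ===== PORT B =====
-- inner `while k < len(rest) and rest[k] not in vowels: k += 1` (count of leading consonants)
def pvLeadLen : List Char → Int
  | [] => 0
  | c :: cs => if pvVowels.contains c then 0 else pvLeadLen cs + 1

lemma pvLeadLen_nonneg (cs : List Char) : 0 ≤ pvLeadLen cs := by
  induction cs with
  | nil => simp [pvLeadLen]
  | cons c cs ih => simp only [pvLeadLen]; split <;> omega

-- outer `while rest:` loop of B; `rest = rest[k + 1:]` is the Python slice
def pvLoopB (cs : List Char) (longest : Int) : Int :=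
  if cs.isEmpty then longest
  else
    let k := pvLeadLen cs
    pvLoopB (PySem.List.slice cs (some (k + 1)) none) (if k > longest then k else longest)
termination_by cs.length
decreasing_by
  rw [PySem.List.slice_from cs (by have := pvLeadLen_nonneg cs; omega)]
  have hne : cs ≠ [] := by simp_all
  have h0 : 0 < cs.length := List.length_pos_iff.mpr hne
  have hk : 1 ≤ (pvLeadLen cs + 1).toNat := by have := pvLeadLen_nonneg cs; omega
  simp only [List.length_drop]; omega

def has_at_least_n_consecutive_consonants_alt (s : String) (n : Int) : Bool :=
  if s.toList.isEmpty then false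
  else pvLoopB s.toList 0 ≥ n

-- ===== PRECONDITION & SPEC =====
def Spec_has_at_least_n_consecutive_consonants (s : String) (n : Int) (out : Bool) : Prop := out = has_at_least_n_consecutive_consonants_alt s n
instance (s : String) (n : Int) (out : Bool) : Decidable (Spec_has_at_least_n_consecutive_consonants s n out) := by unfold Spec_has_at_least_n_consecutive_consonants; infer_instance

-- ===== CLAIM (what is proved, stated in full; the proofs are below) =====
def Claim_equal_has_at_least_n_consecutive_consonants : Prop := ∀ (s : String) (n : Int), Dom_has_at_least_n_consecutive_consonants s n → Spec_has_at_least_n_consecutive_consonants s n (has_at_least_n_consecutive_consonants s n)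

-- ===== LEMMAS AND PROOFS =====

-- A's loop without the early exit: the final value of `max`
def pvMA : List Char → Int → Int → Int
  | [], _, mx => mx
  | c :: cs, i, mx =>
    if pvVowels.contains c then pvMA cs 0 mx
    else pvMA cs (i + 1) (if i + 1 > mx then i + 1 else mx)

-- small rewrite equations (membership form) for the recursive helpers
lemma pvMA_vowel (c : Char) (cs : List Char) (i mx : Int) (hv : c ∈ pvVowels) :
    pvMA (c :: cs) i mx = pvMA cs 0 mx := by simp [pvMA, hv]

lemma pvMA_cons (c : Char) (cs : List Char) (i mx : Int) (hv : c ∉ pvVowels) :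
    pvMA (c :: cs) i mx = pvMA cs (i + 1) (if i + 1 > mx then i + 1 else mx) := by
  simp [pvMA, hv]

lemma pvLoopA_vowel (n : Int) (c : Char) (cs : List Char) (i mx : Int) (hv : c ∈ pvVowels) :
    pvLoopA n (c :: cs) i mx = if n ≤ mx then true else pvLoopA n cs 0 mx := by
  simp [pvLoopA, hv, ge_iff_le]

lemma pvLoopA_cons (n : Int) (c : Char) (cs : List Char) (i mx : Int) (hv : c ∉ pvVowels) :
    pvLoopA n (c :: cs) i mx =
      if n ≤ (if i + 1 > mx then i + 1 else mx) then true
      else pvLoopA n cs (i + 1) (if i + 1 > mx then i + 1 else mx) := by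
  simp [pvLoopA, hv, ge_iff_le]

lemma pvLeadLen_vowel (c : Char) (cs : List Char) (hv : c ∈ pvVowels) :
    pvLeadLen (c :: cs) = 0 := by simp [pvLeadLen, hv]

lemma pvLeadLen_cons (c : Char) (cs : List Char) (hv : c ∉ pvVowels) :
    pvLeadLen (c :: cs) = pvLeadLen cs + 1 := by simp [pvLeadLen, hv]

-- `max` never decreases along A's loop
lemma pvMA_mono : ∀ (cs : List Char) (i mx : Int), mx ≤ pvMA cs i mx := by
  intro cs
  induction cs with
  | nil => intro i mx; simp [pvMA]
  | cons c cs ih =>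
    intro i mx
    by_cases hv : c ∈ pvVowels
    · rw [pvMA_vowel c cs i mx hv]; exact ih 0 mx
    · rw [pvMA_cons c cs i mx hv]
      have h1 := ih (i + 1) (if i + 1 > mx then i + 1 else mx)
      have h2 : mx ≤ (if i + 1 > mx then i + 1 else mx) := by split <;> omega
      omega

-- the early exit only anticipates the final comparison (for a nonempty list)
lemma pvLoopA_eq_MA (n : Int) : ∀ (cs : List Char) (i mx : Int), cs ≠ [] →
    pvLoopA n cs i mx = decide (n ≤ pvMA cs i mx) := by
  intro cs
  induction cs with
  | nil => intro i mx h; exact absurd rfl h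
  | cons c cs ih =>
    intro i mx _
    by_cases hv : c ∈ pvVowels
    · rw [pvLoopA_vowel n c cs i mx hv, pvMA_vowel c cs i mx hv]
      by_cases h : n ≤ mx
      · rw [if_pos h]
        exact (decide_eq_true (le_trans h (pvMA_mono cs 0 mx))).symm
      · rw [if_neg h]
        rcases cs with _ | ⟨d, ds⟩
        · simp only [pvLoopA, pvMA]
          exact (decide_eq_false h).symm
        · exact ih 0 mx (by simp)
    · rw [pvLoopA_cons n c cs i mx hv, pvMA_cons c cs i mx hv]
      by_cases h : n ≤ (if i + 1 > mx then i + 1 else mx)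
      · rw [if_pos h]
        exact (decide_eq_true (le_trans h (pvMA_mono cs (i + 1) _))).symm
      · rw [if_neg h]
        rcases cs with _ | ⟨d, ds⟩
        · simp only [pvLoopA, pvMA]
          exact (decide_eq_false h).symm
        · exact ih (i + 1) _ (by simp)

-- slice by a nonnegative amount is a drop (specialised form used by B's loop)
lemma pvSlice_eq_drop (cs : List Char) :
    PySem.List.slice cs (some (pvLeadLen cs + 1)) none = cs.drop ((pvLeadLen cs).toNat + 1) := by
  rw [PySem.List.slice_from cs (by have := pvLeadLen_nonneg cs; omega)]
  congr 1
  have := pvLeadLen_nonneg cs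
  omega

lemma pvLoopB_nil (L : Int) : pvLoopB [] L = L := by
  rw [pvLoopB]; rfl

lemma pvLoopB_step (cs : List Char) (L : Int) (h : cs ≠ []) :
    pvLoopB cs L = pvLoopB (cs.drop ((pvLeadLen cs).toNat + 1)) (max (pvLeadLen cs) L) := by
  conv_lhs => rw [pvLoopB]
  have h' : cs.isEmpty = false := by simp [h]
  have hmax : (if pvLeadLen cs > L then pvLeadLen cs else L) = max (pvLeadLen cs) L := by
    split <;> omega
  simp only [h', Bool.false_eq_true, if_false, pvSlice_eq_drop, hmax]

-- accumulator lemma for B's loop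
lemma pvLoopB_acc : ∀ (m : Nat) (cs : List Char), cs.length ≤ m → ∀ L : Int, 0 ≤ L →
    pvLoopB cs L = max L (pvLoopB cs 0) := by
  intro m
  induction m with
  | zero =>
    intro cs hm L hL
    have : cs = [] := List.length_eq_zero_iff.mp (Nat.le_zero.mp hm)
    subst this
    rw [pvLoopB_nil, pvLoopB_nil]; omega
  | succ m ih =>
    intro cs hm L hL
    by_cases hne : cs = []
    · subst hne; rw [pvLoopB_nil, pvLoopB_nil]; omega
    · have hk := pvLeadLen_nonneg cs
      have h0 : 0 < cs.length := List.length_pos_iff.mpr hne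
      have hshort : (cs.drop ((pvLeadLen cs).toNat + 1)).length ≤ m := by
        simp only [List.length_drop]; omega
      rw [pvLoopB_step cs L hne, pvLoopB_step cs 0 hne,
          ih (cs.drop ((pvLeadLen cs).toNat + 1)) hshort (max (pvLeadLen cs) L) (by omega),
          ih (cs.drop ((pvLeadLen cs).toNat + 1)) hshort (max (pvLeadLen cs) 0) (by omega)]
      omega

-- one unfolding of B's pure longest-run value
lemma pvLP_unfold (cs : List Char) :
    pvLoopB cs 0 = max (pvLeadLen cs) (pvLoopB (cs.drop ((pvLeadLen cs).toNat + 1)) 0) := by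
  by_cases hne : cs = []
  · subst hne
    rw [pvLoopB_nil]
    simp only [pvLeadLen, List.drop_nil, pvLoopB_nil]
    omega
  · have hk := pvLeadLen_nonneg cs
    rw [pvLoopB_step cs 0 hne,
        pvLoopB_acc (cs.drop ((pvLeadLen cs).toNat + 1)).length _ le_rfl _ (by omega)]
    omega

lemma pvLP_nonneg (cs : List Char) : 0 ≤ pvLoopB cs 0 := by
  rw [pvLP_unfold]
  have := pvLeadLen_nonneg cs
  omega

lemma pvLeadLen_le_len (cs : List Char) : pvLeadLen cs ≤ (cs.length : Int) := by
  induction cs with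
  | nil => simp [pvLeadLen]
  | cons c cs ih =>
    simp only [pvLeadLen, List.length_cons]
    have := pvLeadLen_nonneg cs
    split <;> omega

-- the longest run is at most the length of the string
lemma pvLP_le_len : ∀ (m : Nat) (cs : List Char), cs.length ≤ m → pvLoopB cs 0 ≤ (cs.length : Int) := by
  intro m
  induction m with
  | zero =>
    intro cs hm
    have : cs = [] := List.length_eq_zero_iff.mp (Nat.le_zero.mp hm)
    subst this; rw [pvLoopB_nil]; simp
  | succ m ih =>
    intro cs hm
    by_cases hne : cs = []
    · subst hne; rw [pvLoopB_nil]; simp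
    · have hk := pvLeadLen_nonneg cs
      have h0 : 0 < cs.length := List.length_pos_iff.mpr hne
      have hlead := pvLeadLen_le_len cs
      have hshort : (cs.drop ((pvLeadLen cs).toNat + 1)).length ≤ m := by
        simp only [List.length_drop]; omega
      have hdrop := ih _ hshort
      simp only [List.length_drop] at hdrop
      rw [pvLP_unfold cs]
      have hcast : (((cs.length - ((pvLeadLen cs).toNat + 1) : Nat)) : Int) ≤ (cs.length : Int) := by
        omega
      omega

-- the main bridge: A's final `max` is the old `max` joined with the best run
-- reachable from counter state `i` (the leading block extends the current run)
lemma pvMA_eq : ∀ (m : Nat) (cs : List Char), cs.length ≤ m → ∀ (i mx : Int), 0 ≤ i → i ≤ mx →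
    pvMA cs i mx = max mx (max (i + pvLeadLen cs) (pvLoopB (cs.drop ((pvLeadLen cs).toNat + 1)) 0)) := by
  intro m
  induction m with
  | zero =>
    intro cs hm i mx h0 hle
    have : cs = [] := List.length_eq_zero_iff.mp (Nat.le_zero.mp hm)
    subst this
    simp only [pvMA, pvLeadLen, List.drop_nil, pvLoopB_nil]
    omega
  | succ m ih =>
    intro cs hm i mx h0 hle
    rcases cs with _ | ⟨c, cs'⟩
    · simp only [pvMA, pvLeadLen, List.drop_nil, pvLoopB_nil]
      omega
    · have hm' : cs'.length ≤ m := by simpa using hm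
      by_cases hv : c ∈ pvVowels
      · rw [pvMA_vowel c cs' i mx hv, pvLeadLen_vowel c cs' hv]
        rw [ih cs' hm' 0 mx le_rfl (by omega)]
        have hLP := pvLP_unfold cs'
        have hk := pvLeadLen_nonneg cs'
        have hLPn := pvLP_nonneg cs'
        have hdrop1 : (c :: cs').drop (((0:Int)).toNat + 1) = cs' := by simp
        rw [hdrop1]
        omega
      · rw [pvMA_cons c cs' i mx hv, pvLeadLen_cons c cs' hv]
        have hk := pvLeadLen_nonneg cs'
        have hdrop : (c :: cs').drop ((pvLeadLen cs' + 1).toNat + 1) = cs'.drop ((pvLeadLen cs').toNat + 1) := by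
          have h1 : (pvLeadLen cs' + 1).toNat = (pvLeadLen cs').toNat + 1 := by omega
          simp [h1]
        rw [hdrop]
        rw [ih cs' hm' (i + 1) (if i + 1 > mx then i + 1 else mx) (by omega) (by split <;> omega)]
        have hLPn := pvLP_nonneg (cs'.drop ((pvLeadLen cs').toNat + 1))
        split <;> omega

-- ===== VERDICT (by name: the statement is the Claim_ definition above) =====
theorem has_at_least_n_consecutive_consonants_spec : Claim_equal_has_at_least_n_consecutive_consonants := by
  unfold Claim_equal_has_at_least_n_consecutive_consonants Spec_has_at_least_n_consecutive_consonants
  intro s n _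
  unfold has_at_least_n_consecutive_consonants has_at_least_n_consecutive_consonants_alt
  have hlen : (s.length : Int) = (s.toList.length : Int) := by
    rw [String.length_toList]
  rcases hcs : s.toList with _ | ⟨c, cs⟩
  · -- empty string: both sides false
    rw [hcs] at hlen
    rw [hlen]
    simp only [List.isEmpty_nil, if_true, List.length_nil]
    split
    · rfl
    · simp [pvLoopA]
  · rw [hcs] at hlen
    have hMA : pvMA (c :: cs) 0 0 = pvLoopB (c :: cs) 0 := by
      rw [pvMA_eq (c :: cs).length (c :: cs) le_rfl 0 0 le_rfl le_rfl]
      rw [pvLP_unfold (c :: cs)]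
      have h1 := pvLeadLen_nonneg (c :: cs)
      have h2 := pvLP_nonneg ((c :: cs).drop ((pvLeadLen (c :: cs)).toNat + 1))
      omega
    rw [hlen]
    simp only [List.isEmpty_cons, Bool.false_eq_true, if_false]
    split
    · -- len(s) < n : A returns false, and B's longest ≤ len < n
      rename_i hlt
      have hbound := pvLP_le_len (c :: cs).length (c :: cs) le_rfl
      have hn : ¬ (pvLoopB (c :: cs) 0 ≥ n) := by omega
      simp [hn]
    · rw [pvLoopA_eq_MA n (c :: cs) 0 0 (by simp), hMA]
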